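-- pv_equiv track=rewrite | github.com/pypi-data/pypi-mirror-295 | packages/cvd-color-palette-generator/cvd_color_palette_generator-0.1.tar.gz/cvd_color_palette_generator-0.1/cvd_color_palette_generator/aux_functions.py | obtener_posiciones_ordenadas
-- ===== SOURCE A (Python) =====
-- def obtener_posiciones_ordenadas(matrix, n):
--     """
--     Obtains the positions of values greater than n in a matrix and returns them in descending order of their values.
--     Args:
--         matrix (list[list[int]]): The matrix to search for positions.
--         n (int): The threshold value.
--     Returns:
--         list[tuple[int, int]]: A list of tuples representing the positions (row, column) of values greater than n, sorted in descending order of their values.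
--     """
--
--     posiciones = []
--
--     # Recorre la matriz y almacena las posiciones de los valores mayores a n
--     for i, fila in enumerate(matrix):
--         for j, valor in enumerate(fila):
--             if valor > n:
--                 posiciones.append((i, j, valor))
--
--     # Ordena las posiciones por el valor de mayor a menor
--     posiciones.sort(key=lambda x: x[2], reverse=True)
--
--     # Devuelve solo las posiciones (fila, columna)
--     return [(i, j) for i, j, valor in posiciones]
-- ===== SOURCE B (Python) =====
-- def obtener_posiciones_ordenadas(matrix, n):
--     """Positions (row, col) of values > n, in descending order of their values
--     (ties in row-major order): collect the distinct qualifying values in a set,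
--     then for each value in descending order re-scan the matrix and emit the
--     positions holding exactly that value.  No list of positions is ever sorted."""
--     valores = set()
--     for fila in matrix:
--         for v in fila:
--             if v > n:
--                 valores.add(v)
--     resultado = []
--     for v in sorted(valores, reverse=True):
--         for i, fila in enumerate(matrix):
--             for j, valor in enumerate(fila):
--                 if valor == v:
--                     resultado.append((i, j))
--     return resultado
-- ===== Notes on version B (the rewrite author's own statement) =====
-- stated objective: alternative
-- what changed: B never sorts or stores position records at all: it collects the distinct values greater than n into a set in one pass, and then for each distinct value, taken in descending order, re-scans the whole matrix and emits the positions equal to that value, so the output is produced by repeated selection scans (O(k*m)) instead of a stable sort of an (i, j, value) record list.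
import Mathlib
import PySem

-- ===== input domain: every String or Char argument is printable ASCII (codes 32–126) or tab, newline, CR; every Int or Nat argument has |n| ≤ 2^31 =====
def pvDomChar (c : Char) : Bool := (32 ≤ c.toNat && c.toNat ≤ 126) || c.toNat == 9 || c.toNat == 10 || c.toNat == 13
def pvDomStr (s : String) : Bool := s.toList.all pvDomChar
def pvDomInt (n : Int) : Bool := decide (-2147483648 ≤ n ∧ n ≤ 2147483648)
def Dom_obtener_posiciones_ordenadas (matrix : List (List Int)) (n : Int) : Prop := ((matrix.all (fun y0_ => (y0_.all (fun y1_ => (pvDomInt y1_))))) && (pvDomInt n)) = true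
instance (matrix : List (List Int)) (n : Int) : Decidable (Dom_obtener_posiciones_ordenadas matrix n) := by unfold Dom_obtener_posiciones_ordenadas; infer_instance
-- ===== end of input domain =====

-- ===== PORT A =====
def obtener_posiciones_ordenadas (matrix : List (List Int)) (n : Int) : List (Int × Int) :=
  -- for i, fila in enumerate(matrix): for j, valor in enumerate(fila): if valor > n: posiciones.append((i, j, valor))
  let posiciones : List (Int × Int × Int) :=
    (PySem.List.enumerate matrix 0).foldl (fun acc p =>
      (PySem.List.enumerate p.2 0).foldl (fun acc q =>
        if n < q.2 then acc ++ [(p.1, q.1, q.2)] else acc) acc) []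
  -- posiciones.sort(key=lambda x: x[2], reverse=True)
  let ordenadas := PySem.List.sorted posiciones (fun x => x.2.2) true
  -- [(i, j) for i, j, valor in posiciones]
  ordenadas.map (fun x => (x.1, x.2.1))

-- ===== PORT B =====
def obtener_posiciones_ordenadas_alt (matrix : List (List Int)) (n : Int) : List (Int × Int) :=
  -- valores = set(); for fila in matrix: for v in fila: if v > n: valores.add(v)
  let valores : PySem.Set Int :=
    matrix.foldl (fun s fila =>
      fila.foldl (fun s v => if n < v then PySem.Set.add s v else s) s) PySem.Set.empty
  -- for v in sorted(valores, reverse=True): for i, fila in enumerate(matrix):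
  --   for j, valor in enumerate(fila): if valor == v: resultado.append((i, j))
  -- (sorted over the set with the identity key: order-independent, safe to port)
  (PySem.List.sorted valores (fun k => k) true).foldl (fun res v =>
    (PySem.List.enumerate matrix 0).foldl (fun res p =>
      (PySem.List.enumerate p.2 0).foldl (fun res q =>
        if q.2 == v then res ++ [(p.1, q.1)] else res) res) res) []

-- ===== PRECONDITION & SPEC =====
def Spec_obtener_posiciones_ordenadas (matrix : List (List Int)) (n : Int) (out : List (Int × Int)) : Prop := out = obtener_posiciones_ordenadas_alt matrix n
instance (matrix : List (List Int)) (n : Int) (out : List (Int × Int)) : Decidable (Spec_obtener_posiciones_ordenadas matrix n out) := by unfold Spec_obtener_posiciones_ordenadas; infer_instance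

-- ===== CLAIM (what is proved, stated in full; the proofs are below) =====
def Claim_equal_obtener_posiciones_ordenadas : Prop := ∀ (matrix : List (List Int)) (n : Int), Dom_obtener_posiciones_ordenadas matrix n → Spec_obtener_posiciones_ordenadas matrix n (obtener_posiciones_ordenadas matrix n)

-- ===== LEMMAS AND PROOFS =====

-- insertBy walks past a prefix none of whose elements trigger `before`
theorem insertBy_append_left {α : Type} (before : α → α → Bool) (x : α) (l r : List α)
    (h : ∀ y ∈ l, before x y = false) :
    PySem.List.insertBy before x (l ++ r) = l ++ PySem.List.insertBy before x r := by
  induction l with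
  | nil => simp
  | cons a t ih =>
    have ha : before x a = false := h a (by simp)
    simp [PySem.List.insertBy, ha, ih (fun y hy => h y (by simp [hy]))]

-- insertBy puts x in front when every element (in particular the head) triggers `before`
theorem insertBy_all_before {α : Type} (before : α → α → Bool) (x : α) (l : List α)
    (h : ∀ y ∈ l, before x y = true) :
    PySem.List.insertBy before x l = x :: l := by
  cases l with
  | nil => rfl
  | cons a t => simp [PySem.List.insertBy, h a (by simp)]

-- inserting x into a key-homogeneous grouped list, keys strictly descending
theorem insertBy_grouped {α : Type} (key : α → Int) (x : α) (K : List Int) (g : Int → List α)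
    (hg : ∀ k ∈ K, ∀ y ∈ g k, key y = k) (hK : K.Pairwise (· > ·)) :
    PySem.List.insertBy (fun a b => decide (key b < key a)) x (K.flatMap g)
      = (K.filter (fun k => decide (key x < k))).flatMap g
        ++ (if key x ∈ K then g (key x) ++ [x] else [x])
        ++ (K.filter (fun k => decide (k < key x))).flatMap g := by
  induction K with
  | nil => simp [PySem.List.insertBy]
  | cons k Ks ih =>
    have hKs : Ks.Pairwise (· > ·) := hK.tail
    have hlt : ∀ k' ∈ Ks, k' < k := fun k' h' => List.rel_of_pairwise_cons hK h'
    have hgk : ∀ y ∈ g k, key y = k := hg k (by simp)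
    have hgKs : ∀ k' ∈ Ks, ∀ y ∈ g k', key y = k' := fun k' h' => hg k' (by simp [h'])
    rcases lt_trichotomy (key x) k with hc | hc | hc
    · -- key x < k : skip the whole group g k, recurse
      have hskip : ∀ y ∈ g k, (fun a b => decide (key b < key a)) x y = false := by
        intro y hy; simp [hgk y hy]; omega
      rw [List.flatMap_cons, insertBy_append_left _ _ _ _ hskip, ih hgKs hKs]
      have hne : key x ≠ k := ne_of_lt hc
      have h1 : (k :: Ks).filter (fun k' => decide (key x < k')) =
          k :: Ks.filter (fun k' => decide (key x < k')) := by simp [hc]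
      have h2 : (k :: Ks).filter (fun k' => decide (k' < key x)) =
          Ks.filter (fun k' => decide (k' < key x)) := by
        simp [List.filter_cons]; omega
      have h3 : (if key x ∈ k :: Ks then g (key x) ++ [x] else [x])
          = (if key x ∈ Ks then g (key x) ++ [x] else [x]) := by
        by_cases h : key x ∈ Ks <;> simp [h, hne]
      rw [h1, h2, h3, List.flatMap_cons]
      simp [List.append_assoc]
    · -- key x = k : skip g k, then everything after has smaller key
      have hskip : ∀ y ∈ g k, (fun a b => decide (key b < key a)) x y = false := by
        intro y hy; simp [hgk y hy, hc]
      have hall : ∀ y ∈ Ks.flatMap g, (fun a b => decide (key b < key a)) x y = true := by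
        intro y hy
        rcases List.mem_flatMap.mp hy with ⟨k', hk', hy'⟩
        simp [hgKs k' hk' y hy', hc]
        exact hlt k' hk'
      rw [List.flatMap_cons, insertBy_append_left _ _ _ _ hskip, insertBy_all_before _ _ _ hall]
      have h1 : (k :: Ks).filter (fun k' => decide (key x < k')) = [] := by
        rw [List.filter_eq_nil_iff]
        intro k' hk'
        rcases List.mem_cons.mp hk' with h | h
        · simp [h, hc]
        · have := hlt k' h; simp; omega
      have h2 : (k :: Ks).filter (fun k' => decide (k' < key x)) = Ks := by
        rw [List.filter_cons]
        have : ¬ (k < key x) := by omega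
        simp only [this, decide_false, if_neg Bool.false_ne_true]
        exact List.filter_eq_self.mpr (fun k' h' => by simp [hlt k' h', hc])
      have h3 : key x ∈ k :: Ks := by simp [hc]
      rw [h1, h2, if_pos h3, hc]
      simp
    · -- k < key x : everything has smaller key, x goes first
      have hall : ∀ y ∈ (k :: Ks).flatMap g, (fun a b => decide (key b < key a)) x y = true := by
        intro y hy
        rcases List.mem_flatMap.mp hy with ⟨k', hk', hy'⟩
        rcases List.mem_cons.mp hk' with h | h
        · simp [hg k' hk' y hy', h, hc]
        · have := hlt k' h
          simp [hg k' hk' y hy']; omega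
      rw [insertBy_all_before _ _ _ hall]
      have h1 : (k :: Ks).filter (fun k' => decide (key x < k')) = [] := by
        rw [List.filter_eq_nil_iff]
        intro k' hk'
        rcases List.mem_cons.mp hk' with h | h
        · simp [h]; omega
        · have := hlt k' h; simp; omega
      have h2 : (k :: Ks).filter (fun k' => decide (k' < key x)) = k :: Ks := by
        refine List.filter_eq_self.mpr (fun k' h' => ?_)
        rcases List.mem_cons.mp h' with h | h
        · simp [h, hc]
        · have := hlt k' h; simp; omega
      have h3 : key x ∉ k :: Ks := by
        intro h
        rcases List.mem_cons.mp h with h | h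
        · omega
        · have := hlt _ h; omega
      rw [h1, h2, if_neg h3]
      simp

-- a strictly descending list containing k0 splits around k0
theorem desc_split (K : List Int) (k0 : Int) (hK : K.Pairwise (· > ·)) (hmem : k0 ∈ K) :
    K = K.filter (fun k => decide (k0 < k)) ++ k0 :: K.filter (fun k => decide (k < k0)) := by
  induction K with
  | nil => cases hmem
  | cons k Ks ih =>
    have hlt : ∀ k' ∈ Ks, k' < k := fun k' h' => List.rel_of_pairwise_cons hK h'
    rcases List.mem_cons.mp hmem with h | h
    · subst h
      have h1 : (k0 :: Ks).filter (fun k' => decide (k0 < k')) = [] := by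
        rw [List.filter_eq_nil_iff]
        intro k' hk'
        rcases List.mem_cons.mp hk' with hh | hh
        · simp [hh]
        · have := hlt k' hh; simp; omega
      have h2 : (k0 :: Ks).filter (fun k' => decide (k' < k0)) = Ks := by
        rw [List.filter_cons]
        have hnn : ¬ (k0 < k0) := lt_irrefl _
        simp only [hnn, decide_false, if_neg Bool.false_ne_true]
        exact List.filter_eq_self.mpr (fun k' h' => by simp [hlt k' h'])
      rw [h1, h2, List.nil_append]
    · have hk0k : k0 < k := hlt k0 h
      have h1 : (k :: Ks).filter (fun k' => decide (k0 < k')) =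
          k :: Ks.filter (fun k' => decide (k0 < k')) := by simp [hk0k]
      have h2 : (k :: Ks).filter (fun k' => decide (k' < k0)) =
          Ks.filter (fun k' => decide (k' < k0)) := by
        rw [List.filter_cons]; simp; omega
      rw [h1, h2, List.cons_append]
      exact congrArg (k :: ·) (ih hK.tail h)

-- MAIN: the stable descending sort is the concatenation of the key groups,
-- over any strictly descending enumeration K of the keys occurring in xs
theorem sorted_rev_eq_flatMap_groups {α : Type} (key : α → Int) (xs : List α) (K : List Int)
    (hK : K.Pairwise (· > ·)) (hmem : ∀ k, k ∈ K ↔ k ∈ xs.map key) :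
    PySem.List.sorted xs key true = K.flatMap (fun k => xs.filter (fun y => key y == k)) := by
  induction xs using List.reverseRecOn generalizing K with
  | nil => simp [PySem.List.sorted]
  | append_singleton xs x ih =>
    have hsort : PySem.List.sorted (xs ++ [x]) key true =
        PySem.List.insertBy (fun a b => decide (key b < key a)) x (PySem.List.sorted xs key true) := by
      rw [PySem.List.sorted_rev_eq_foldl_insertBy, PySem.List.sorted_rev_eq_foldl_insertBy,
        List.foldl_append]
      rfl
    set k0 := key x with hk0
    -- the key list for xs
    set K' := K.filter (fun k => decide (k ∈ xs.map key)) with hK'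
    have hK'p : K'.Pairwise (· > ·) := List.Pairwise.sublist List.filter_sublist hK
    have hmem' : ∀ k, k ∈ K' ↔ k ∈ xs.map key := by
      intro k
      constructor
      · intro h
        have := List.of_mem_filter h
        simpa using this
      · intro h
        refine List.mem_filter.mpr ⟨(hmem k).mpr ?_, by simpa using h⟩
        simp [h]
    have hg : ∀ k ∈ K', ∀ y ∈ xs.filter (fun y => key y == k), key y = k := by
      intro k _ y hy
      have := List.of_mem_filter hy
      simpa using this
    rw [hsort, ih K' hK'p hmem',
      insertBy_grouped key x K' (fun k => xs.filter (fun y => key y == k)) hg hK'p]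
    have hk0K : k0 ∈ K := (hmem k0).mpr (by simp [hk0])
    -- filters over K' agree with filters over K away from k0
    have hfilter_gt : K'.filter (fun k => decide (k0 < k)) = K.filter (fun k => decide (k0 < k)) := by
      rw [hK', List.filter_filter]
      refine List.filter_congr (fun k hk => ?_)
      by_cases h : k0 < k
      · have hne : k ≠ k0 := by omega
        have : k ∈ xs.map key := by
          have := (hmem k).mp hk
          rcases (by simpa using this : k ∈ xs.map key ∨ k = k0) with h' | h'
          · exact h'
          · exact absurd h' hne
        simp [h, this]
      · simp [h]
    have hfilter_lt : K'.filter (fun k => decide (k < k0)) = K.filter (fun k => decide (k < k0)) := by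
      rw [hK', List.filter_filter]
      refine List.filter_congr (fun k hk => ?_)
      by_cases h : k < k0
      · have hne : k ≠ k0 := by omega
        have : k ∈ xs.map key := by
          have := (hmem k).mp hk
          rcases (by simpa using this : k ∈ xs.map key ∨ k = k0) with h' | h'
          · exact h'
          · exact absurd h' hne
        simp [h, this]
      · simp [h]
    -- the middle group: with or without previous occurrences of k0
    have hmid : (if k0 ∈ K' then xs.filter (fun y => key y == k0) ++ [x] else [x])
        = xs.filter (fun y => key y == k0) ++ [x] := by
      by_cases h : k0 ∈ K'
      · rw [if_pos h]
      · rw [if_neg h]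
        have : xs.filter (fun y => key y == k0) = [] := by
          rw [List.filter_eq_nil_iff]
          intro y hy hkey
          exact h ((hmem' k0).mpr (List.mem_map.mpr ⟨y, hy, by simpa using hkey⟩))
        rw [this, List.nil_append]
    rw [hfilter_gt, hfilter_lt, hmid]
    -- decompose K around k0 on the right-hand side
    conv_rhs => rw [desc_split K k0 hK hk0K]
    rw [List.flatMap_append, List.flatMap_cons]
    have hgrp : ∀ (L : List Int), (∀ k ∈ L, k ≠ k0) →
        L.flatMap (fun k => (xs ++ [x]).filter (fun y => key y == k))
          = L.flatMap (fun k => xs.filter (fun y => key y == k)) := by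
      intro L hL
      rw [List.flatMap, List.flatMap]
      refine congrArg List.flatten (List.map_congr_left (fun k hk => ?_))
      rw [List.filter_append]
      have : [x].filter (fun y => key y == k) = [] := by
        simp [List.filter_cons]
        exact fun h => hL k hk h.symm
      rw [this, List.append_nil]
    have h1 := hgrp (K.filter (fun k => decide (k0 < k)))
      (fun k hk => by have := List.of_mem_filter hk; simp at this; omega)
    have h2 := hgrp (K.filter (fun k => decide (k < k0)))
      (fun k hk => by have := List.of_mem_filter hk; simp at this; omega)
    rw [h1, h2]
    have h3 : (xs ++ [x]).filter (fun y => key y == k0) =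
        xs.filter (fun y => key y == k0) ++ [x] := by
      rw [List.filter_append]
      simp [hk0]
    rw [h3]
    simp [List.append_assoc]

-- the flat record list (i, j, valor) A's loop collects
def pvRecs (matrix : List (List Int)) (n : Int) : List (Int × Int × Int) :=
  (PySem.List.enumerate matrix 0).flatMap (fun p =>
    ((PySem.List.enumerate p.2 0).filter (fun q => decide (n < q.2))).map
      (fun q => (p.1, q.1, q.2)))

theorem portA_eq (matrix : List (List Int)) (n : Int) :
    obtener_posiciones_ordenadas matrix n =
      (PySem.List.sorted (pvRecs matrix n) (fun r => r.2.2) true).map (fun r => (r.1, r.2.1)) := by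
  unfold obtener_posiciones_ordenadas pvRecs
  simp only [PySem.List.foldl_append_ite, PySem.List.foldl_append_eq_flatMap, List.nil_append]

-- enumerate is invisible to a flatMap that only reads the element
theorem flatMap_enumerate_snd {α β : Type} (xs : List α) (s : Int) (g : α → List β) :
    (PySem.List.enumerate xs s).flatMap (fun p => g p.2) = xs.flatMap g := by
  induction xs generalizing s with
  | nil => rfl
  | cons x t ih => simp [PySem.List.enumerate_cons, ih]

-- filtering enumerate on the element and projecting = filtering the list
theorem filter_enumerate_snd {α : Type} (xs : List α) (s : Int) (P : α → Bool) :
    (((PySem.List.enumerate xs s).filter (fun q => P q.2)).map (fun q => q.2)) = xs.filter P := by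
  induction xs generalizing s with
  | nil => rfl
  | cons x t ih =>
    by_cases h : P x = true <;>
      simp [PySem.List.enumerate_cons, h, ih]

-- the qualifying values, in row-major scan order
def pvVals (matrix : List (List Int)) (n : Int) : List Int :=
  matrix.flatMap (fun fila => fila.filter (fun v => decide (n < v)))

theorem map_key_recs (matrix : List (List Int)) (n : Int) :
    (pvRecs matrix n).map (fun r => r.2.2) = pvVals matrix n := by
  unfold pvRecs pvVals
  rw [List.map_flatMap]
  have h : ∀ (p : Int × List Int),
      (((PySem.List.enumerate p.2 0).filter (fun q => decide (n < q.2))).map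
        (fun q => (p.1, q.1, q.2))).map (fun r => r.2.2)
      = p.2.filter (fun v => decide (n < v)) := by
    intro p
    rw [List.map_map]
    exact filter_enumerate_snd p.2 0 (fun v => decide (n < v))
  calc (PySem.List.enumerate matrix 0).flatMap (fun p =>
          (((PySem.List.enumerate p.2 0).filter (fun q => decide (n < q.2))).map
            (fun q => (p.1, q.1, q.2))).map (fun r => r.2.2))
      = (PySem.List.enumerate matrix 0).flatMap (fun p => p.2.filter (fun v => decide (n < v))) := by
        rw [List.flatMap, List.flatMap]
        exact congrArg List.flatten (List.map_congr_left (fun p _ => h p))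
    _ = matrix.flatMap (fun fila => fila.filter (fun v => decide (n < v))) :=
        flatMap_enumerate_snd matrix 0 _

-- B's first pass builds exactly set(pvVals)
theorem valores_eq (matrix : List (List Int)) (n : Int) :
    matrix.foldl (fun s fila =>
        fila.foldl (fun s v => if n < v then PySem.Set.add s v else s) s)
      (PySem.Set.empty : PySem.Set Int)
    = PySem.Set.ofList (pvVals matrix n) := by
  unfold pvVals
  rw [PySem.Set.ofList_eq_foldl, List.foldl_flatMap]
  simp only [PySem.List.foldl_ite_eq_foldl_filter]
  rfl

-- a value in pvVals is strictly above the threshold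
theorem mem_pvVals_gt (matrix : List (List Int)) (n : Int) (v : Int) (h : v ∈ pvVals matrix n) :
    n < v := by
  unfold pvVals at h
  rcases List.mem_flatMap.mp h with ⟨fila, _, hv⟩
  have := List.of_mem_filter hv
  simpa using this

-- A's key group for a qualifying value v = B's re-scan of the matrix for v
theorem group_eq (matrix : List (List Int)) (n : Int) (v : Int) (hv : n < v) :
    ((pvRecs matrix n).filter (fun r => r.2.2 == v)).map (fun r => (r.1, r.2.1))
    = (PySem.List.enumerate matrix 0).flatMap (fun p =>
        ((PySem.List.enumerate p.2 0).filter (fun q => q.2 == v)).map (fun q => (p.1, q.1))) := by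
  unfold pvRecs
  rw [List.filter_flatMap, List.map_flatMap]
  rw [List.flatMap, List.flatMap]
  refine congrArg List.flatten (List.map_congr_left (fun p _ => ?_))
  rw [List.filter_map, List.map_map, List.filter_filter]
  have hfil : (PySem.List.enumerate p.2 0).filter
        (fun a => ((fun r => r.2.2 == v) ∘ fun q => (p.1, q.1, q.2)) a && decide (n < a.2))
      = (PySem.List.enumerate p.2 0).filter (fun q => q.2 == v) := by
    refine List.filter_congr (fun q _ => ?_)
    by_cases h : q.2 = v
    · simp [h, hv]
    · simp [h]
  rw [hfil]
  rfl

theorem main_eq (matrix : List (List Int)) (n : Int) :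
    obtener_posiciones_ordenadas matrix n = obtener_posiciones_ordenadas_alt matrix n := by
  unfold obtener_posiciones_ordenadas_alt
  rw [valores_eq]
  set Kb := PySem.List.sorted (PySem.Set.ofList (pvVals matrix n)) (fun k => k) true with hKb
  have hKbperm : Kb.Perm (PySem.Set.ofList (pvVals matrix n)) :=
    PySem.List.sorted_perm _ (fun k => k) true
  have hKbnodup : Kb.Nodup := hKbperm.symm.nodup (PySem.Set.nodup_ofList _)
  have hKbpair : Kb.Pairwise (· > ·) := by
    have h1 : Kb.Pairwise (fun a b => b ≤ a) :=
      PySem.List.sorted_pairwise_rev (PySem.Set.ofList (pvVals matrix n)) (fun k => k)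
    have h2 : Kb.Pairwise (· ≠ ·) := hKbnodup
    exact (h1.and h2).imp (fun {a b} h => lt_of_le_of_ne h.1 (Ne.symm h.2))
  have hKbmem : ∀ k, k ∈ Kb ↔ k ∈ (pvRecs matrix n).map (fun r => r.2.2) := by
    intro k
    rw [map_key_recs, hKbperm.mem_iff, PySem.Set.mem_ofList]
  -- B's triple loop is a flatMap of re-scans over the descending value list
  simp only [PySem.List.foldl_append_if, PySem.List.foldl_append_eq_flatMap, List.nil_append]
  -- A's sorted record list is the flatMap of the key groups over the same list
  rw [portA_eq,
    sorted_rev_eq_flatMap_groups (fun r => r.2.2) (pvRecs matrix n) Kb hKbpair hKbmem,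
    List.map_flatMap]
  rw [List.flatMap, List.flatMap]
  refine congrArg List.flatten (List.map_congr_left (fun v hvK => ?_))
  have hv : n < v := mem_pvVals_gt matrix n v (by
    have := (hKbmem v).mp hvK
    rwa [map_key_recs] at this)
  exact group_eq matrix n v hv

-- ===== VERDICT (by name: the statement is the Claim_ definition above) =====
theorem obtener_posiciones_ordenadas_spec : Claim_equal_obtener_posiciones_ordenadas := by
  intro matrix n _
  unfold Spec_obtener_posiciones_ordenadas
  exact main_eq matrix n
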